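-- pv_equiv track=rewrite | github.com/HITESH-235/CP_Club_SST | Aug_28/Closest_MinMax.py | closest_MinMax
-- ===== SOURCE A (Python) =====
-- def closest_MinMax(nums):
--     n = len(nums)
--     min_val = min(nums)
--     max_val = max(nums)
--
--     min_index = -1
--     max_index = -1
--
--     res = float('inf')
--     i = 0
--     while i < n:
--         if min_val == nums[i]:
--             min_index = i
--         if max_val == nums[i]:
--             max_index = i
--         if min_index != -1 and max_index != -1:
--             res = min(res, abs(min_index - max_index)+1)
--         i += 1
--     return res
-- ===== SOURCE B (Python) =====
-- def closest_MinMax(nums):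
--     lo = min(nums)
--     hi = max(nums)
--     mins = [i for i, v in enumerate(nums) if v == lo]
--     maxs = [i for i, v in enumerate(nums) if v == hi]
--     best = abs(mins[0] - maxs[0]) + 1
--     i = 0
--     j = 0
--     while i < len(mins) and j < len(maxs):
--         d = abs(mins[i] - maxs[j]) + 1
--         if d < best:
--             best = d
--         if mins[i] < maxs[j]:
--             i += 1
--         else:
--             j += 1
--     return best
-- ===== Notes on version B (the rewrite author's own statement) =====
-- stated objective: alternative
-- what changed: Replaced the single streaming scan with last-seen min/max indices and a running minimum by collecting the min-occurrence and max-occurrence index lists once and doing a two-pointer merge over the two sorted lists.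
-- outside the precondition, e.g. on closest_MinMax([]): A raises ValueError, B raises ValueError
import Mathlib
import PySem

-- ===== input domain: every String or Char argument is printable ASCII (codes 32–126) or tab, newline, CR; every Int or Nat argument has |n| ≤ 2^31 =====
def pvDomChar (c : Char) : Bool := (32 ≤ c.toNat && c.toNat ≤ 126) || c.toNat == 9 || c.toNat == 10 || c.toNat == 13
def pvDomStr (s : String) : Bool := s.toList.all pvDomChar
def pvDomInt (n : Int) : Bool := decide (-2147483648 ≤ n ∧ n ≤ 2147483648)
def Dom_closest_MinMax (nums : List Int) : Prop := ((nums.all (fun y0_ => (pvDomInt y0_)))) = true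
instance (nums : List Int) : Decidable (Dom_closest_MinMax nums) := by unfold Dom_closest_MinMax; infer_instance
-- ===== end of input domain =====

-- B replaces A's streaming last-seen-index scan by a two-pointer merge of the min/max occurrence index lists (alternative decomposition, same cost).

-- ===== PORT A =====
-- A-side helper: the body of A's while-loop, acting on the state (min_index, max_index, res);
-- res : Option Int, none = float('inf') (the loop's min with inf).
def aStep (min_val max_val : Int) (st : Int × Int × Option Int) (i v : Int) :
    Int × Int × Option Int :=
  let min_index := if min_val = v then i else st.1
  let max_index := if max_val = v then i else st.2.1
  let res :=
    if min_index ≠ -1 ∧ max_index ≠ -1 then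
      some (match st.2.2 with
        | none => |min_index - max_index| + 1
        | some r => min r (|min_index - max_index| + 1))
    else st.2.2
  (min_index, max_index, res)

def closest_MinMax (nums : List Int) : Int :=
  let n : Int := (nums.length : Int)
  let min_val : Int := (PySem.List.min? nums (fun x => x)).getD 0
  let max_val : Int := (PySem.List.max? nums (fun x => x)).getD 0
  let st :=
    (PySem.List.pyRange 0 n 1).foldl
      (fun st i => aStep min_val max_val st i (PySem.List.pyGetD nums i 0))
      (-1, -1, none)
  st.2.2.getD 0

-- ===== PORT B =====
-- B-side helper: the two-pointer while-loop over the two index lists (suffixes stand for the indices i, j).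
def altLoop (ms xs : List Int) (best : Int) : Int :=
  match ms, xs with
  | m :: ms', x :: xs' =>
      let d := |m - x| + 1
      let best' := if d < best then d else best
      if m < x then altLoop ms' (x :: xs') best'
      else altLoop (m :: ms') xs' best'
  | _, _ => best
termination_by ms.length + xs.length

def closest_MinMax_alt (nums : List Int) : Int :=
  let lo : Int := (PySem.List.min? nums (fun x => x)).getD 0
  let hi : Int := (PySem.List.max? nums (fun x => x)).getD 0
  let mins := ((PySem.List.enumerate nums 0).filter (fun p => p.2 == lo)).map (·.1)
  let maxs := ((PySem.List.enumerate nums 0).filter (fun p => p.2 == hi)).map (·.1)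
  let best := |mins.headD 0 - maxs.headD 0| + 1
  altLoop mins maxs best

-- ===== PRECONDITION & SPEC =====
-- Python A raises ValueError (min of empty sequence) on []; B does the same, so [] is excluded.
def Pre_closest_MinMax (nums : List Int) : Prop := nums ≠ []
instance (nums : List Int) : Decidable (Pre_closest_MinMax nums) := by
  unfold Pre_closest_MinMax; infer_instance
def pvWitness_closest_MinMax : List Int := [3, 1, 4, 1, 5]

def Spec_closest_MinMax (nums : List Int) (out : Int) : Prop := out = closest_MinMax_alt nums
instance (nums : List Int) (out : Int) : Decidable (Spec_closest_MinMax nums out) := by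
  unfold Spec_closest_MinMax; infer_instance

-- ===== CLAIM (what is proved, stated in full; the proofs are below) =====
def Claim_equal_closest_MinMax : Prop := ∀ (nums : List Int), Dom_closest_MinMax nums → Pre_closest_MinMax nums → Spec_closest_MinMax nums (closest_MinMax nums)

-- ===== LEMMAS AND PROOFS =====

-- min on Option Int, none acting as +infinity
def pmin : Option Int → Option Int → Option Int
  | none, b => b
  | some a, none => some a
  | some a, some b => some (min a b)

-- min over q ∈ xs of |p - q| + 1
def rowMin (p : Int) (xs : List Int) : Option Int :=
  xs.foldr (fun q acc => pmin (some (|p - q| + 1)) acc) none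

-- min over p ∈ ms, q ∈ xs of |p - q| + 1
def G (ms xs : List Int) : Option Int :=
  ms.foldr (fun p acc => pmin (rowMin p xs) acc) none

-- occurrence index list of value t in l, indices starting at k
def occ (t k : Int) : List Int → List Int
  | [] => []
  | v :: l => if t = v then k :: occ t (k + 1) l else occ t (k + 1) l

theorem pmin_none_left (b : Option Int) : pmin none b = b := rfl

theorem pmin_none_right (a : Option Int) : pmin a none = a := by
  cases a <;> rfl

theorem pmin_assoc (a b c : Option Int) : pmin (pmin a b) c = pmin a (pmin b c) := by
  cases a <;> cases b <;> cases c <;> simp [pmin, min_assoc]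

theorem pmin_comm (a b : Option Int) : pmin a b = pmin b a := by
  cases a <;> cases b <;> simp [pmin, min_comm]

theorem pmin_ac (a b c d : Option Int) :
    pmin (pmin a b) (pmin c d) = pmin (pmin a c) (pmin b d) := by
  cases a <;> cases b <;> cases c <;> cases d <;> simp [pmin] <;> omega

theorem mem_getLastD {l : List Int} : ∀ (d : Int), l ≠ [] → l.getLastD d ∈ l := by
  induction l with
  | nil => intro d h; exact absurd rfl h
  | cons a t ih =>
    intro d _
    rw [List.getLastD_cons]
    cases t with
    | nil => simp
    | cons b t' => exact List.mem_cons_of_mem a (ih a (by simp))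

theorem getLastD_irrel {l : List Int} (h : l ≠ []) (d d' : Int) :
    l.getLastD d = l.getLastD d' := by
  cases l with
  | nil => exact absurd rfl h
  | cons a t => rw [List.getLastD_cons, List.getLastD_cons]

theorem getLastD_append_singleton (l : List Int) (a d : Int) :
    (l ++ [a]).getLastD d = a := by
  induction l generalizing d with
  | nil => rfl
  | cons b t ih => rw [List.cons_append, List.getLastD_cons, ih]

theorem headD_mem {l : List Int} (d : Int) (h : l ≠ []) : l.headD d ∈ l := by
  cases l with
  | nil => exact absurd rfl h
  | cons a t => simp

theorem isChain_tail {a : Int} {l : List Int}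
    (h : List.IsChain (· ≤ ·) (a :: l)) : List.IsChain (· ≤ ·) l := by
  cases l with
  | nil => exact List.isChain_nil
  | cons b t => exact (List.isChain_cons_cons.mp h).2

theorem isChain_append_singleton {l : List Int} {k : Int}
    (h : List.IsChain (· ≤ ·) l) (hb : ∀ a ∈ l, a ≤ k) :
    List.IsChain (· ≤ ·) (l ++ [k]) := by
  induction l with
  | nil => exact List.isChain_singleton k
  | cons a t ih =>
    rw [List.cons_append]
    cases t with
    | nil => exact List.isChain_cons_cons.mpr ⟨hb a (by simp), List.isChain_singleton k⟩
    | cons b t' =>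
      exact List.isChain_cons_cons.mpr
        ⟨(List.isChain_cons_cons.mp h).1,
         ih (List.isChain_cons_cons.mp h).2 (fun x hx => hb x (List.mem_cons_of_mem a hx))⟩

theorem rowMin_cons (p q : Int) (xs : List Int) :
    rowMin p (q :: xs) = pmin (some (|p - q| + 1)) (rowMin p xs) := rfl

theorem rowMin_append_singleton (p k : Int) (xs : List Int) :
    rowMin p (xs ++ [k]) = pmin (rowMin p xs) (some (|p - k| + 1)) := by
  induction xs with
  | nil => simp [rowMin, pmin]
  | cons q t ih =>
    simp only [List.cons_append, rowMin_cons, ih, pmin_assoc]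

theorem rowMin_pos {p r : Int} {xs : List Int} (h : rowMin p xs = some r) : 1 ≤ r := by
  induction xs generalizing r with
  | nil => simp [rowMin] at h
  | cons q t ih =>
    rw [rowMin_cons] at h
    have habs := abs_nonneg (p - q)
    cases hr : rowMin p t with
    | none =>
      rw [hr, pmin_none_right] at h
      injection h with h
      omega
    | some s =>
      rw [hr] at h
      simp only [pmin, Option.some.injEq] at h
      have := ih hr
      omega

theorem rowMin_le {p q : Int} {xs : List Int} (h : q ∈ xs) :
    ∃ r, rowMin p xs = some r ∧ r ≤ |p - q| + 1 := by
  induction xs with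
  | nil => simp at h
  | cons a t ih =>
    rw [rowMin_cons]
    rcases List.mem_cons.mp h with h | h
    · subst h
      cases hr : rowMin p t with
      | none => exact ⟨_, rfl, le_refl _⟩
      | some s => exact ⟨_, rfl, min_le_left _ _⟩
    · obtain ⟨r, hr, hle⟩ := ih h
      rw [hr]
      exact ⟨_, rfl, le_trans (min_le_right _ _) hle⟩

theorem G_cons (m : Int) (ms xs : List Int) :
    G (m :: ms) xs = pmin (rowMin m xs) (G ms xs) := rfl

theorem G_nil_right (ms : List Int) : G ms [] = none := by
  induction ms with
  | nil => rfl
  | cons m t ih => rw [G_cons, ih, pmin_none_right]; rfl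

theorem G_cons_right (x : Int) (ms xs : List Int) :
    G ms (x :: xs) = pmin (rowMin x ms) (G ms xs) := by
  induction ms with
  | nil => rfl
  | cons m t ih =>
    rw [G_cons, rowMin_cons, ih, G_cons, rowMin_cons, abs_sub_comm m x]
    exact pmin_ac _ _ _ _

theorem G_append_left (k : Int) (ms xs : List Int) :
    G (ms ++ [k]) xs = pmin (G ms xs) (rowMin k xs) := by
  induction ms with
  | nil => rw [List.nil_append, G_cons]; exact pmin_comm _ _
  | cons m t ih => rw [List.cons_append, G_cons, ih, G_cons, pmin_assoc]

theorem G_append_right (k : Int) (ms xs : List Int) :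
    G ms (xs ++ [k]) = pmin (G ms xs) (rowMin k ms) := by
  induction ms with
  | nil => rfl
  | cons m t ih =>
    rw [G_cons, rowMin_append_singleton, ih, G_cons, rowMin_cons, abs_sub_comm k m]
    exact pmin_ac _ _ _ _

theorem G_le_pair {p q : Int} {ms xs : List Int} (hp : p ∈ ms) (hq : q ∈ xs) :
    ∃ g, G ms xs = some g ∧ g ≤ |p - q| + 1 := by
  induction ms with
  | nil => simp at hp
  | cons m t ih =>
    rw [G_cons]
    rcases List.mem_cons.mp hp with h | h
    · subst h
      obtain ⟨r, hr, hle⟩ := rowMin_le (p := p) hq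
      rw [hr]
      cases hG : G t xs with
      | none => rw [pmin_none_right]; exact ⟨_, rfl, hle⟩
      | some g => exact ⟨_, rfl, le_trans (min_le_left _ _) hle⟩
    · obtain ⟨g, hg, hle⟩ := ih h
      rw [hg]
      cases hr : rowMin m xs with
      | none => rw [pmin_none_left]; exact ⟨_, rfl, hle⟩
      | some r => exact ⟨_, rfl, le_trans (min_le_right _ _) hle⟩

theorem le_getLastD {a : Int} {l : List Int} :
    ∀ (d : Int), List.IsChain (· ≤ ·) (a :: l) → a ≤ (a :: l).getLastD d := by
  induction l generalizing a with
  | nil => intro d _; simp [List.getLastD]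
  | cons b t ih =>
    intro d h
    have hab : a ≤ b := (List.isChain_cons_cons.mp h).1
    have hb := ih a (List.isChain_cons_cons.mp h).2
    rw [List.getLastD_cons]
    omega

-- min over q of |k - q| + 1 over an ascending list bounded above by k: attained at the last element
theorem rowMin_sorted_ub {k : Int} {xs : List Int} (hs : List.IsChain (· ≤ ·) xs)
    (hub : ∀ q ∈ xs, q ≤ k) (hne : xs ≠ []) :
    rowMin k xs = some (k - xs.getLastD 0 + 1) := by
  induction xs with
  | nil => exact absurd rfl hne
  | cons q t ih =>
    cases t with
    | nil =>
      have : q ≤ k := hub q (by simp)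
      simp [rowMin, pmin, List.getLastD, abs_of_nonneg (by omega : (0:Int) ≤ k - q)]
    | cons b t' =>
      have ht := (List.isChain_cons_cons.mp hs).2
      rw [rowMin_cons, ih ht (fun a ha => hub a (List.mem_cons_of_mem q ha)) (by simp)]
      have hq : q ≤ k := hub q (by simp)
      have hqb : q ≤ b := (List.isChain_cons_cons.mp hs).1
      have hlast : q ≤ (b :: t').getLastD 0 := le_trans hqb (le_getLastD 0 ht)
      have hL : ((q :: b :: t' : List Int)).getLastD 0 = (b :: t').getLastD 0 := by
        rw [List.getLastD_cons]
        exact getLastD_irrel (by simp) q 0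
      rw [hL]
      simp only [pmin, Option.some.injEq]
      rw [abs_of_nonneg (by omega : (0:Int) ≤ k - q)]
      omega

-- min over q of |m - q| + 1 over an ascending list whose head is ≥ m: attained at the head
theorem rowMin_sorted_lb {m x : Int} {xs : List Int} (hs : List.IsChain (· ≤ ·) (x :: xs))
    (hm : m ≤ x) : rowMin m (x :: xs) = some (x - m + 1) := by
  induction xs generalizing x with
  | nil =>
    rw [rowMin_cons, show rowMin m ([] : List Int) = none from rfl, pmin_none_right,
      abs_of_nonpos (by omega : m - x ≤ 0)]
    congr 1
    omega
  | cons b t ih =>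
    have hxb : x ≤ b := (List.isChain_cons_cons.mp hs).1
    rw [rowMin_cons, ih (List.isChain_cons_cons.mp hs).2 (by omega)]
    simp only [pmin, Option.some.injEq]
    rw [abs_of_nonpos (by omega : m - x ≤ 0)]
    omega

theorem pmin_pos_one {o : Option Int} (h : ∀ r, o = some r → 1 ≤ r) :
    pmin o (some 1) = some 1 := by
  cases o with
  | none => rfl
  | some r => simp [pmin, min_eq_right (h r rfl)]

-- occ facts
theorem occ_cons (t k v : Int) (l : List Int) :
    occ t k (v :: l) = (if t = v then [k] else []) ++ occ t (k + 1) l := by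
  by_cases h : t = v <;> simp [occ, h]

theorem mem_occ {t a : Int} {l : List Int} : ∀ {k : Int}, a ∈ occ t k l → k ≤ a := by
  induction l with
  | nil => intro k h; simp [occ] at h
  | cons v l ih =>
    intro k h
    rw [occ_cons] at h
    rcases List.mem_append.mp h with h | h
    · by_cases hv : t = v
      · simp [hv] at h; omega
      · simp [hv] at h
    · have := ih h; omega

theorem chain_occ (t : Int) (l : List Int) : ∀ k : Int, List.IsChain (· ≤ ·) (occ t k l) := by
  induction l with
  | nil => intro k; exact List.isChain_nil
  | cons v l ih =>
    intro k
    rw [occ_cons]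
    split
    · cases hocc : occ t (k + 1) l with
      | nil => simpa [hocc] using List.isChain_singleton k
      | cons a s =>
        have ha : k + 1 ≤ a := mem_occ (t := t) (l := l) (by rw [hocc]; simp)
        have hch := ih (k + 1)
        rw [hocc] at hch
        simp only [List.cons_append, List.nil_append]
        exact List.isChain_cons_cons.mpr ⟨by omega, hch⟩
    · simpa using ih (k + 1)

theorem occ_ne_nil {t : Int} {l : List Int} (h : t ∈ l) : ∀ k : Int, occ t k l ≠ [] := by
  induction l with
  | nil => simp at h
  | cons v l ih =>
    intro k
    rw [occ_cons]
    rcases List.mem_cons.mp h with h | h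
    · simp [h]
    · intro hc
      rcases List.append_eq_nil_iff.mp hc with ⟨-, h2⟩
      exact ih h (k + 1) h2

theorem occ_eq_filter (t : Int) (l : List Int) : ∀ k : Int,
    occ t k l = ((PySem.List.enumerate l k).filter (fun p => p.2 == t)).map (·.1) := by
  induction l with
  | nil => intro k; rfl
  | cons v l ih =>
    intro k
    rw [occ_cons, PySem.List.enumerate_cons, List.filter_cons]
    by_cases h : t = v
    · subst h
      simp [ih (k + 1)]
    · simp [h, Ne.symm h, ih (k + 1)]

-- A's loop step, characterised: the state stays (last min index, last max index, min over all pairs)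
theorem aStep_eq (lo hi k v : Int) (ms xs : List Int) (hk : 0 ≤ k)
    (hmb : ∀ a ∈ ms, 0 ≤ a ∧ a < k) (hmc : List.IsChain (· ≤ ·) ms)
    (hxb : ∀ a ∈ xs, 0 ≤ a ∧ a < k) (hxc : List.IsChain (· ≤ ·) xs) :
    aStep lo hi (ms.getLastD (-1), xs.getLastD (-1), G ms xs) k v
      = ((ms ++ if lo = v then [k] else []).getLastD (-1),
         (xs ++ if hi = v then [k] else []).getLastD (-1),
         G (ms ++ if lo = v then [k] else []) (xs ++ if hi = v then [k] else [])) := by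
  have hk' : k ≠ -1 := by omega
  by_cases hv1 : lo = v
  · by_cases hv2 : hi = v
    · -- v is both the min and the max value
      subst hv1; subst hv2
      simp only [aStep, if_pos rfl, ne_eq, hk', not_false_eq_true, and_self, if_true,
        getLastD_append_singleton, Prod.mk.injEq, true_and]
      rw [G_append_left, G_append_right, rowMin_append_singleton]
      have h0 : |k - k| + 1 = 1 := by simp
      rw [h0, pmin_pos_one (fun r hr => rowMin_pos hr), pmin_assoc,
        pmin_pos_one (fun r hr => rowMin_pos hr)]
      cases hG : G ms xs <;> simp [pmin]
    · -- v is the min value only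
      subst hv1
      by_cases hxe : xs = []
      · subst hxe
        simp only [aStep, if_pos rfl, if_neg hv2, List.getLastD_nil, List.append_nil, ne_eq,
          hk', not_false_eq_true, true_and, G_nil_right]
        simp [getLastD_append_singleton, G_nil_right]
      · have hxne : xs.getLastD (-1) ≠ -1 := by
          have := hxb _ (mem_getLastD (-1) hxe); omega
        have hlast0 : xs.getLastD (-1) = xs.getLastD 0 := getLastD_irrel hxe _ _
        have habs : |k - xs.getLastD (-1)| + 1 = k - xs.getLastD 0 + 1 := by
          rw [hlast0, abs_of_nonneg]
          have := hxb _ (mem_getLastD 0 hxe); omega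
        simp only [aStep, if_pos rfl, if_neg hv2, List.append_nil, ne_eq, hk',
          not_false_eq_true, hxne, and_self, if_true, getLastD_append_singleton,
          Prod.mk.injEq, true_and, habs]
        rw [G_append_left, rowMin_sorted_ub hxc (fun q hq => by have := hxb q hq; omega) hxe]
        cases hG : G ms xs <;> simp [pmin]
  · by_cases hv2 : hi = v
    · -- v is the max value only
      subst hv2
      by_cases hme : ms = []
      · subst hme
        simp only [aStep, if_neg hv1, if_pos rfl, List.getLastD_nil, List.append_nil,
          List.nil_append, ne_eq, neg_neg]
        simp [G]
      · have hmne : ms.getLastD (-1) ≠ -1 := by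
          have := hmb _ (mem_getLastD (-1) hme); omega
        have hlast0 : ms.getLastD (-1) = ms.getLastD 0 := getLastD_irrel hme _ _
        have habs : |ms.getLastD (-1) - k| + 1 = k - ms.getLastD 0 + 1 := by
          rw [hlast0, abs_of_nonpos]
          · omega
          · have := hmb _ (mem_getLastD 0 hme); omega
        simp only [aStep, if_neg hv1, if_pos rfl, List.append_nil, ne_eq, hmne, hk',
          not_false_eq_true, and_self, if_true, getLastD_append_singleton,
          Prod.mk.injEq, true_and, habs]
        rw [G_append_right, rowMin_sorted_ub hmc (fun q hq => by have := hmb q hq; omega) hme]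
        cases hG : G ms xs <;> simp [pmin]
    · -- v is neither the min nor the max value
      simp only [aStep, if_neg hv1, if_neg hv2, List.append_nil, ne_eq, Prod.mk.injEq,
        true_and]
      by_cases hme : ms = []
      · subst hme
        simp [G]
      · by_cases hxe : xs = []
        · subst hxe
          simp [G_nil_right]
        · have hmne : ms.getLastD (-1) ≠ -1 := by
            have := hmb _ (mem_getLastD (-1) hme); omega
          have hxne : xs.getLastD (-1) ≠ -1 := by
            have := hxb _ (mem_getLastD (-1) hxe); omega
          obtain ⟨g, hG, hle⟩ := G_le_pair (mem_getLastD (-1) hme) (mem_getLastD (-1) hxe)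
          simp only [hmne, hxne, ne_eq, not_false_eq_true, and_self, if_true, hG,
            Option.some.injEq]
          exact min_eq_left hle

theorem aLoop (lo hi : Int) (l : List Int) : ∀ (k : Int) (ms xs : List Int),
    0 ≤ k → List.IsChain (· ≤ ·) ms → (∀ a ∈ ms, 0 ≤ a ∧ a < k) →
    List.IsChain (· ≤ ·) xs → (∀ a ∈ xs, 0 ≤ a ∧ a < k) →
    (PySem.List.enumerate l k).foldl (fun st p => aStep lo hi st p.1 p.2)
        (ms.getLastD (-1), xs.getLastD (-1), G ms xs)
      = ((ms ++ occ lo k l).getLastD (-1), (xs ++ occ hi k l).getLastD (-1),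
         G (ms ++ occ lo k l) (xs ++ occ hi k l)) := by
  induction l with
  | nil =>
    intro k ms xs hk hmc hmb hxc hxb
    simp [PySem.List.enumerate_nil, occ]
  | cons v l ih =>
    intro k ms xs hk hmc hmb hxc hxb
    rw [PySem.List.enumerate_cons, List.foldl_cons]
    rw [show aStep lo hi (ms.getLastD (-1), xs.getLastD (-1), G ms xs) (k, v).1 (k, v).2
        = aStep lo hi (ms.getLastD (-1), xs.getLastD (-1), G ms xs) k v from rfl]
    rw [aStep_eq lo hi k v ms xs hk hmb hmc hxb hxc]
    rw [ih (k + 1) (ms ++ if lo = v then [k] else []) (xs ++ if hi = v then [k] else [])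
      (by omega)
      (by split
          · exact isChain_append_singleton hmc (fun a ha => by have := (hmb a ha).2; omega)
          · simpa using hmc)
      (by intro a ha
          rcases List.mem_append.mp ha with h | h
          · have := hmb a h; omega
          · split at h
            · simp at h; omega
            · simp at h)
      (by split
          · exact isChain_append_singleton hxc (fun a ha => by have := (hxb a ha).2; omega)
          · simpa using hxc)
      (by intro a ha
          rcases List.mem_append.mp ha with h | h
          · have := hxb a h; omega
          · split at h
            · simp at h; omega
            · simp at h)]
    rw [occ_cons, occ_cons]
    simp [List.append_assoc]

theorem altLoop_eq : ∀ (n : Nat) (ms xs : List Int) (best : Int), ms.length + xs.length ≤ n →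
    List.IsChain (· ≤ ·) ms → List.IsChain (· ≤ ·) xs →
    altLoop ms xs best = match G ms xs with | none => best | some g => min best g := by
  intro n
  induction n with
  | zero =>
    intro ms xs best h hm hx
    cases ms with
    | nil => rw [show G [] xs = none from rfl]; simp [altLoop]
    | cons m t => simp at h
  | succ n ih =>
    intro ms xs best h hm hx
    cases ms with
    | nil => rw [show G [] xs = none from rfl]; simp [altLoop]
    | cons m ms' =>
      cases xs with
      | nil => simp [altLoop, G_nil_right]
      | cons x xs' =>
        simp only [altLoop]
        by_cases hmx : m < x
        · have habs : |m - x| = x - m := by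
            rw [abs_of_nonpos (by omega : m - x ≤ 0)]; ring
          rw [habs, if_pos hmx]
          rw [ih ms' (x :: xs') _ (by simp at h ⊢; omega) (isChain_tail hm) hx]
          rw [G_cons, rowMin_sorted_lb hx (le_of_lt hmx)]
          cases hG : G ms' (x :: xs') with
          | none => simp only [pmin, min_def]; split_ifs <;> omega
          | some g => simp only [pmin, min_def]; split_ifs <;> omega
        · have habs : |m - x| = m - x := abs_of_nonneg (by omega : (0:Int) ≤ m - x)
          rw [habs, if_neg hmx]
          rw [ih (m :: ms') xs' _ (by simp at h ⊢; omega) hm (isChain_tail hx)]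
          rw [G_cons_right, rowMin_sorted_lb hm (by omega : x ≤ m)]
          cases hG : G (m :: ms') xs' with
          | none => simp only [pmin, min_def]; split_ifs <;> omega
          | some g => simp only [pmin, min_def]; split_ifs <;> omega

theorem A_val {nums : List Int} {lo hi : Int}
    (hlo : PySem.List.min? nums (fun x => x) = some lo)
    (hhi : PySem.List.max? nums (fun x => x) = some hi) :
    closest_MinMax nums = (G (occ lo 0 nums) (occ hi 0 nums)).getD 0 := by
  unfold closest_MinMax
  simp only [hlo, hhi, Option.getD_some]
  rw [← PySem.List.len_eq]
  have hfold : (PySem.List.pyRange 0 (PySem.List.len nums)).foldl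
      (fun st i => aStep lo hi st i (PySem.List.pyGetD nums i 0))
      ((-1 : Int), (-1 : Int), (none : Option Int))
      = (PySem.List.enumerate nums).foldl (fun st p => aStep lo hi st p.1 p.2)
        ((-1 : Int), (-1 : Int), (none : Option Int)) := by
    rw [PySem.List.enumerate_eq_map_pyRange nums 0, List.foldl_map]
  rw [hfold]
  rw [show ((-1 : Int), (-1 : Int), (none : Option Int))
      = ((([] : List Int)).getLastD (-1), (([] : List Int)).getLastD (-1),
         G ([] : List Int) ([] : List Int)) from rfl]
  rw [aLoop lo hi nums 0 [] [] le_rfl List.isChain_nil (by simp) List.isChain_nil (by simp)]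
  simp

theorem B_val {nums : List Int} {lo hi : Int}
    (hlo : PySem.List.min? nums (fun x => x) = some lo)
    (hhi : PySem.List.max? nums (fun x => x) = some hi) :
    closest_MinMax_alt nums = (G (occ lo 0 nums) (occ hi 0 nums)).getD 0 := by
  have hlom : lo ∈ nums := PySem.List.min?_mem hlo
  have hhim : hi ∈ nums := PySem.List.max?_mem hhi
  have hMne := occ_ne_nil hlom 0
  have hXne := occ_ne_nil hhim 0
  unfold closest_MinMax_alt
  simp only [hlo, hhi, Option.getD_some]
  rw [← occ_eq_filter lo nums 0, ← occ_eq_filter hi nums 0]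
  rw [altLoop_eq ((occ lo 0 nums).length + (occ hi 0 nums).length) _ _ _ le_rfl
    (chain_occ lo nums 0) (chain_occ hi nums 0)]
  obtain ⟨g, hG, hle⟩ := G_le_pair (headD_mem 0 hMne) (headD_mem 0 hXne)
  rw [hG]
  simp only [Option.getD_some]
  exact min_eq_right hle

theorem closest_MinMax_spec : Claim_equal_closest_MinMax := by
  intro nums _ hpre
  unfold Pre_closest_MinMax at hpre
  unfold Spec_closest_MinMax
  obtain ⟨lo, hlo⟩ : ∃ m, PySem.List.min? nums (fun x => x) = some m := by
    cases h : PySem.List.min? nums (fun x => x) with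
    | none => exact absurd ((PySem.List.min?_eq_none_iff nums _).mp h) hpre
    | some m => exact ⟨m, rfl⟩
  obtain ⟨hi, hhi⟩ : ∃ m, PySem.List.max? nums (fun x => x) = some m := by
    cases h : PySem.List.max? nums (fun x => x) with
    | none => exact absurd ((PySem.List.max?_eq_none_iff nums _).mp h) hpre
    | some m => exact ⟨m, rfl⟩
  rw [A_val hlo hhi, B_val hlo hhi]
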